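-- pv_equiv track=rewrite | github.com/OTOYO1020/ChatDev_Intermediate | WareHouse/ED_287__20250518085814/lcp_calculator.py | max_lcp
-- ===== SOURCE A (Python) =====
-- from typing import List
--
-- def lcp(x: str, y: str) -> int:
--     '''
--     Calculate the longest common prefix between two strings.
--     '''
--     min_length = min(len(x), len(y))
--     for i in range(min_length):
--         if x[i] != y[i]:
--             return i
--     return min_length
--
-- def max_lcp(strings: List[str]) -> List[int]:
--     '''
--     Calculate the maximum LCP for each string against all other strings.
--     This implementation sorts the strings and compares adjacent strings.
--     '''
--     n = len(strings)
--     max_lcp_values = [0] * n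
--     # Pair strings with their original indices for result mapping
--     indexed_strings = list(enumerate(strings))
--     indexed_strings.sort(key=lambda x: x[1])  # Sort by string value
--     # Compare adjacent strings in the sorted order
--     for i in range(n - 1):
--         idx1, str1 = indexed_strings[i]
--         idx2, str2 = indexed_strings[i + 1]
--         lcp_value = lcp(str1, str2)
--         max_lcp_values[idx1] = max(max_lcp_values[idx1], lcp_value)
--         max_lcp_values[idx2] = max(max_lcp_values[idx2], lcp_value)
--     return max_lcp_values
-- ===== SOURCE B (Python) =====
-- from typing import List
--
-- def lcp(x: str, y: str) -> int:
--     '''Longest common prefix length, by scanning the zipped characters.'''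
--     n = 0
--     for a, b in zip(x, y):
--         if a != b:
--             break
--         n += 1
--     return n
--
-- def max_lcp(strings: List[str]) -> List[int]:
--     '''All-pairs: each string's answer is the max LCP against every other string.'''
--     return [
--         max((lcp(s, t) for j, t in enumerate(strings) if j != i), default=0)
--         for i, s in enumerate(strings)
--     ]
-- ===== Notes on version B (the rewrite author's own statement) =====
-- stated objective: simpler
-- what changed: Replaced the sort-then-compare-adjacent-pairs-with-index-bookkeeping algorithm by the direct all-pairs maximum: for each string take max of lcp against every other string, no sorting and no in-place array updates.
import Mathlib
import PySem

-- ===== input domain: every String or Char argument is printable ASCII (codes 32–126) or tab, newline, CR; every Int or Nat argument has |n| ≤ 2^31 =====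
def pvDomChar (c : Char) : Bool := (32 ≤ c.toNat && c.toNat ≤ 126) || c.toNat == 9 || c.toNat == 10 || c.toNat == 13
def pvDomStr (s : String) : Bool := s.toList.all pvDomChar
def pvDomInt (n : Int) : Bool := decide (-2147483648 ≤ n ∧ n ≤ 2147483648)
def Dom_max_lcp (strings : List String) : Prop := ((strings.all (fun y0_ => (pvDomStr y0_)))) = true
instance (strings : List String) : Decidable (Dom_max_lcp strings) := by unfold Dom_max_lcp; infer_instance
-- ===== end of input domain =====

-- B replaces A's sort-then-compare-adjacent algorithm by the direct all-pairs maximum (simpler; equal return values, proved below).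

-- ===== PORT A =====
-- A's lcp: scan indices 0..min(len)-1, return first mismatch index, else min length.
def pvLcpLoopA (x y : List Char) (m i : Nat) : Int :=
  if _h : i < m then
    if x.getD i ' ' ≠ y.getD i ' ' then (i : Int)
    else pvLcpLoopA x y m (i + 1)
  else (m : Int)
termination_by m - i
decreasing_by omega

def pvLcpA (x y : String) : Int :=
  pvLcpLoopA x.toList y.toList (min x.toList.length y.toList.length) 0

def max_lcp (strings : List String) : List Int :=
  let n := strings.length
  let init : List Int := List.replicate n 0
  let srt := PySem.List.sorted (PySem.List.enumerate strings 0) (fun p => p.2) false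
  (PySem.List.pyRange 0 ((n : Int) - 1) 1).foldl (fun acc i =>
    let p1 := PySem.List.pyGetD srt i (0, "")
    let p2 := PySem.List.pyGetD srt (i + 1) (0, "")
    let v := pvLcpA p1.2 p2.2
    let acc1 := PySem.List.pySetD acc p1.1 (max (PySem.List.pyGetD acc p1.1 0) v)
    PySem.List.pySetD acc1 p2.1 (max (PySem.List.pyGetD acc1 p2.1 0) v)) init

-- ===== PORT B =====
-- B's lcp: walk the two strings in lockstep (the zip loop), stop at first mismatch.
def pvLcpB (x y : List Char) : Nat :=
  match x, y with
  | a :: x, b :: y => if a = b then 1 + pvLcpB x y else 0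
  | _, _ => 0

def max_lcp_alt (strings : List String) : List Int :=
  (PySem.List.enumerate strings 0).map (fun is =>
    ((PySem.List.enumerate strings 0).foldl
      (fun acc jt => if jt.1 ≠ is.1 then max acc (pvLcpB is.2.toList jt.2.toList) else acc)
      (0 : Nat) : Nat))

-- ===== PRECONDITION & SPEC =====
def Spec_max_lcp (strings : List String) (out : List Int) : Prop := out = max_lcp_alt strings
instance (strings : List String) (out : List Int) : Decidable (Spec_max_lcp strings out) := by unfold Spec_max_lcp; infer_instance

-- ===== CLAIM (what is proved, stated in full; the proofs are below) =====
def Claim_equal_max_lcp : Prop := ∀ (strings : List String), Dom_max_lcp strings → Spec_max_lcp strings (max_lcp strings)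

-- ===== LEMMAS AND PROOFS =====

-- lcp facts ------------------------------------------------------------

theorem pvLcpB_comm (x y : List Char) : pvLcpB x y = pvLcpB y x := by
  induction x generalizing y with
  | nil => cases y <;> rfl
  | cons a x ih =>
    cases y with
    | nil => rfl
    | cons b y =>
      simp only [pvLcpB]
      by_cases h : a = b
      · subst h; simp [ih]
      · rw [if_neg h, if_neg (fun hh => h hh.symm)]

theorem cons_not_le_nil (a : Char) (x : List Char) : ¬ (a :: x ≤ ([] : List Char)) := by
  rw [le_iff_lt_or_eq]
  rintro (h | h)
  · exact List.not_lt_nil _ h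
  · exact List.cons_ne_nil _ _ h

theorem cons_le_cons_iff' (a b : Char) (x y : List Char) :
    (a :: x ≤ b :: y) ↔ (a < b ∨ a = b ∧ x ≤ y) := by
  rw [le_iff_lt_or_eq, List.cons_lt_cons_iff, List.cons_eq_cons]
  constructor
  · rintro ((h | ⟨h1, h2⟩) | ⟨h1, h2⟩)
    · exact Or.inl h
    · exact Or.inr ⟨h1, le_of_lt h2⟩
    · exact Or.inr ⟨h1, le_of_eq h2⟩
  · rintro (h | ⟨h1, h2⟩)
    · exact Or.inl (Or.inl h)
    · rcases lt_or_eq_of_le h2 with h | h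
      · exact Or.inl (Or.inr ⟨h1, h⟩)
      · exact Or.inr ⟨h1, h⟩

-- for x ≤ y ≤ z: the lcp with the farther string is at most the lcp with the nearer one
theorem pvLcpB_le_left (x y z : List Char) (hxy : x ≤ y) (hyz : y ≤ z) :
    pvLcpB x z ≤ pvLcpB x y := by
  induction x generalizing y z with
  | nil => simp [pvLcpB]
  | cons a x ih =>
    cases y with
    | nil => exact absurd hxy (cons_not_le_nil _ _)
    | cons b y =>
      cases z with
      | nil => exact absurd hyz (cons_not_le_nil _ _)
      | cons c z =>
        simp only [pvLcpB]
        by_cases hac : a = c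
        · subst hac
          rcases (cons_le_cons_iff' _ _ _ _).1 hxy with h | ⟨hab, hxy'⟩
          · rcases (cons_le_cons_iff' _ _ _ _).1 hyz with h' | ⟨hba, _⟩
            · exact absurd (lt_trans h h') (lt_irrefl a)
            · exact absurd (hba ▸ h) (lt_irrefl b)
          · subst hab
            rcases (cons_le_cons_iff' _ _ _ _).1 hyz with h' | ⟨_, hyz'⟩
            · exact absurd h' (lt_irrefl a)
            · rw [if_pos rfl, if_pos rfl]
              exact Nat.add_le_add_left (ih y z hxy' hyz') 1
        · simp [hac]

theorem pvLcpB_le_right (x y z : List Char) (hxy : x ≤ y) (hyz : y ≤ z) :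
    pvLcpB x z ≤ pvLcpB y z := by
  induction x generalizing y z with
  | nil => simp [pvLcpB]
  | cons a x ih =>
    cases y with
    | nil => exact absurd hxy (cons_not_le_nil _ _)
    | cons b y =>
      cases z with
      | nil => exact absurd hyz (cons_not_le_nil _ _)
      | cons c z =>
        simp only [pvLcpB]
        by_cases hac : a = c
        · subst hac
          rcases (cons_le_cons_iff' _ _ _ _).1 hxy with h | ⟨hab, hxy'⟩
          · rcases (cons_le_cons_iff' _ _ _ _).1 hyz with h' | ⟨hba, _⟩
            · exact absurd (lt_trans h h') (lt_irrefl a)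
            · exact absurd (hba ▸ h) (lt_irrefl b)
          · subst hab
            rcases (cons_le_cons_iff' _ _ _ _).1 hyz with h' | ⟨_, hyz'⟩
            · exact absurd h' (lt_irrefl a)
            · rw [if_pos rfl, if_pos rfl]
              exact Nat.add_le_add_left (ih y z hxy' hyz') 1
        · simp [hac]

theorem pvLcpB_nil_left (z : List Char) : pvLcpB [] z = 0 := by cases z <;> rfl

theorem pvLcpB_nil_right (z : List Char) : pvLcpB z [] = 0 := by cases z <;> rfl

-- A's index-scanning lcp computes the structural lcp
theorem pvLcpLoopA_eq (x y : List Char) (m i : Nat) (hm : m = min x.length y.length)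
    (hi : i ≤ m) :
    pvLcpLoopA x y m i = (i : Int) + (pvLcpB (x.drop i) (y.drop i) : Int) := by
  by_cases h : i < m
  · have hix : i < x.length := by omega
    have hiy : i < y.length := by omega
    have hdx : x.drop i = x[i] :: x.drop (i + 1) := List.drop_eq_getElem_cons hix
    have hdy : y.drop i = y[i] :: y.drop (i + 1) := List.drop_eq_getElem_cons hiy
    rw [pvLcpLoopA]
    simp only [dif_pos h]
    rw [List.getD_eq_getElem x ' ' hix, List.getD_eq_getElem y ' ' hiy]
    by_cases hne : x[i] ≠ y[i]
    · rw [if_pos hne, hdx, hdy]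
      simp [pvLcpB, hne]
    · rw [if_neg hne]
      push_neg at hne
      rw [pvLcpLoopA_eq x y m (i + 1) hm (by omega), hdx, hdy]
      simp [pvLcpB, hne]
      ring
  · have hieq : i = m := by omega
    subst hieq
    rw [pvLcpLoopA]
    simp only [dif_neg h]
    have : pvLcpB (x.drop i) (y.drop i) = 0 := by
      rcases Nat.le_total x.length y.length with h1 | h1
      · have : x.drop i = [] := by
          rw [List.drop_eq_nil_iff]; omega
        rw [this, pvLcpB_nil_left]
      · have : y.drop i = [] := by
          rw [List.drop_eq_nil_iff]; omega
        rw [this, pvLcpB_nil_right]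
    rw [this]; simp
termination_by m - i
decreasing_by omega

theorem pvLcpA_eq (x y : String) : pvLcpA x y = (pvLcpB x.toList y.toList : Int) := by
  rw [pvLcpA, pvLcpLoopA_eq _ _ _ 0 rfl (Nat.zero_le _)]
  simp

-- the Nat-level model of A's fold ---------------------------------------

def pvStepA (t : List (Nat × String)) (acc : List Int) (i : Nat) : List Int :=
  let p1 := t.getD i (0, "")
  let p2 := t.getD (i + 1) (0, "")
  let v : Int := (pvLcpB p1.2.toList p2.2.toList : Int)
  let acc1 := acc.set p1.1 (max (acc.getD p1.1 0) v)
  acc1.set p2.1 (max (acc1.getD p2.1 0) v)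

def pvAMax (t : List (Nat × String)) (k : Nat) : Nat → Nat
  | 0 => 0
  | i + 1 =>
    if (t.getD i (0, "")).1 = k ∨ (t.getD (i + 1) (0, "")).1 = k then
      max (pvAMax t k i) (pvLcpB (t.getD i (0, "")).2.toList (t.getD (i + 1) (0, "")).2.toList)
    else pvAMax t k i

def pvN (s : List String) (k j : Nat) : Nat :=
  pvLcpB (s.getD k "").toList (s.getD j "").toList

def pvBMax (s : List String) (k : Nat) : Nat → Nat
  | 0 => 0
  | i + 1 => if i ≠ k then max (pvBMax s k i) (pvN s k i) else pvBMax s k i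

def pvT (s : List String) : List (Nat × String) :=
  (PySem.List.sorted (PySem.List.enumerate s 0) (fun p => p.2) false).map
    (fun p => (p.1.toNat, p.2))

-- structure of pvT ------------------------------------------------------

theorem pvT_length (s : List String) : (pvT s).length = s.length := by
  simp [pvT, PySem.List.length_sorted, PySem.List.length_enumerate]

theorem pvT_mem (s : List String) (p : Nat × String) (hp : p ∈ pvT s) :
    p.1 < s.length ∧ p.2 = s.getD p.1 "" := by
  rw [pvT, List.mem_map] at hp
  obtain ⟨q, hq, rfl⟩ := hp
  have hq' : q ∈ PySem.List.enumerate s 0 :=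
    (PySem.List.sorted_perm _ _ _).mem_iff.1 hq
  rw [PySem.List.mem_enumerate_iff] at hq'
  obtain ⟨k, hk, rfl⟩ := hq'
  simp [hk]

theorem pvT_surj (s : List String) (j : Nat) (hj : j < s.length) :
    (j, s.getD j "") ∈ pvT s := by
  rw [pvT, List.mem_map]
  refine ⟨((j : Int), s.getD j ""), ?_, by simp⟩
  rw [(PySem.List.sorted_perm _ _ _).mem_iff, PySem.List.mem_enumerate_iff]
  exact ⟨j, hj, by simp [List.getElem?_eq_getElem hj]⟩

theorem pvT_nodup_fst (s : List String) : ((pvT s).map Prod.fst).Nodup := by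
  have hperm : ((PySem.List.sorted (PySem.List.enumerate s 0) (fun p => p.2) false).map
      (fun p : Int × String => p.1)).Perm
      ((PySem.List.enumerate s 0).map (fun p : Int × String => p.1)) :=
    (PySem.List.sorted_perm _ _ _).map _
  have hnodup : ((PySem.List.sorted (PySem.List.enumerate s 0) (fun p => p.2) false).map
      (fun p : Int × String => p.1)).Nodup := by
    rw [hperm.nodup_iff, PySem.List.map_fst_enumerate]
    exact PySem.List.nodup_pyRange_one _ _
  have hnn : ∀ x ∈ (PySem.List.sorted (PySem.List.enumerate s 0) (fun p => p.2) false).map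
      (fun p : Int × String => p.1), 0 ≤ x := by
    intro x hx
    rw [List.mem_map] at hx
    obtain ⟨q, hq, rfl⟩ := hx
    have hq' : q ∈ PySem.List.enumerate s 0 :=
      (PySem.List.sorted_perm _ _ _).mem_iff.1 hq
    rw [PySem.List.mem_enumerate_iff] at hq'
    obtain ⟨k, hk, rfl⟩ := hq'
    simp
  have heq : (pvT s).map Prod.fst = ((PySem.List.sorted (PySem.List.enumerate s 0)
      (fun p => p.2) false).map (fun p : Int × String => p.1)).map Int.toNat := by
    simp [pvT, List.map_map, Function.comp]
  rw [heq]
  exact hnodup.map_on (fun x hx y hy hxy => by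
    have := hnn x hx; have := hnn y hy; omega)

theorem pvT_sorted (s : List String) : (pvT s).Pairwise (fun a b => a.2 ≤ b.2) := by
  rw [pvT, List.pairwise_map]
  exact PySem.List.sorted_pairwise (PySem.List.enumerate s 0) (fun p => p.2)

theorem getD_set (l : List Int) (j : Nat) (x : Int) (k : Nat) :
    (l.set j x).getD k 0 = if k = j ∧ j < l.length then x else l.getD k 0 := by
  by_cases h : k = j
  · subst h
    by_cases hj : k < l.length
    · rw [if_pos ⟨rfl, hj⟩, List.getD_eq_getElem _ 0 (by simpa using hj)]
      simp
    · rw [if_neg (by omega), List.set_eq_of_length_le (by omega)]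
  · rw [if_neg (fun hc => h hc.1), List.getD_eq_getElem?_getD, List.getD_eq_getElem?_getD,
      List.getElem?_set, if_neg (fun hh : j = k => h hh.symm)]

theorem max_lcp_eq_model (s : List String) :
    max_lcp s = (List.range (s.length - 1)).foldl (pvStepA (pvT s)) (List.replicate s.length 0) := by
  unfold max_lcp
  dsimp only
  have hsub : ((s.length : Int) - 1 - 0).toNat = s.length - 1 := by omega
  rw [PySem.List.pyRange_one, hsub, List.foldl_map]
  apply PySem.List.foldl_congr_mem
  intro acc k hk
  rw [List.mem_range] at hk
  have hlen : (PySem.List.sorted (PySem.List.enumerate s 0) (fun p => p.2) false).length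
      = s.length := by
    rw [PySem.List.length_sorted, PySem.List.length_enumerate]
  have hklt : k < (PySem.List.sorted (PySem.List.enumerate s 0) (fun p => p.2) false).length := by
    omega
  have hk1lt : k + 1 <
      (PySem.List.sorted (PySem.List.enumerate s 0) (fun p => p.2) false).length := by omega
  have hcast : (0 : Int) + (k : Int) + 1 = ((k + 1 : Nat) : Int) := by push_cast; ring
  have hg1 : PySem.List.pyGetD (PySem.List.sorted (PySem.List.enumerate s 0)
      (fun p => p.2) false) ((0 : Int) + (k : Int)) (0, "")
      = (PySem.List.sorted (PySem.List.enumerate s 0) (fun p => p.2) false)[k] := by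
    rw [zero_add, PySem.List.pyGetD_natCast, List.getD_eq_getElem _ _ hklt]
  have hg2 : PySem.List.pyGetD (PySem.List.sorted (PySem.List.enumerate s 0)
      (fun p => p.2) false) ((0 : Int) + (k : Int) + 1) (0, "")
      = (PySem.List.sorted (PySem.List.enumerate s 0) (fun p => p.2) false)[k + 1] := by
    rw [hcast, PySem.List.pyGetD_natCast, List.getD_eq_getElem _ _ hk1lt]
  have hmemform : ∀ m : Nat, ∀ hm : m <
      (PySem.List.sorted (PySem.List.enumerate s 0) (fun p => p.2) false).length,
      0 ≤ ((PySem.List.sorted (PySem.List.enumerate s 0) (fun p => p.2) false)[m]).1 := by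
    intro m hm
    have hmem : (PySem.List.sorted (PySem.List.enumerate s 0) (fun p => p.2) false)[m]
        ∈ PySem.List.enumerate s 0 :=
      (PySem.List.sorted_perm _ _ _).mem_iff.1 (List.getElem_mem hm)
    rw [PySem.List.mem_enumerate_iff] at hmem
    obtain ⟨j, hj, heq⟩ := hmem
    rw [heq]; simp
  have htk : ∀ m : Nat, ∀ hm : m < (pvT s).length,
      (pvT s)[m] = (((PySem.List.sorted (PySem.List.enumerate s 0)
        (fun p => p.2) false)[m]'(by rw [hlen]; rw [pvT_length] at hm; omega)).1.toNat,
        ((PySem.List.sorted (PySem.List.enumerate s 0)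
        (fun p => p.2) false)[m]'(by rw [hlen]; rw [pvT_length] at hm; omega)).2) := by
    intro m hm
    simp only [pvT, List.getElem_map]
  simp only [hg1, hg2]
  rw [pvStepA]
  have hTlen : (pvT s).length = s.length := pvT_length s
  have ht1 : (pvT s).getD k (0, "") = (pvT s)[k]'(by omega) :=
    List.getD_eq_getElem _ _ (by omega)
  have ht2 : (pvT s).getD (k + 1) (0, "") = (pvT s)[k + 1]'(by omega) :=
    List.getD_eq_getElem _ _ (by omega)
  rw [ht1, ht2, htk k (by omega), htk (k + 1) (by omega)]
  have h01 := hmemform k hklt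
  have h02 := hmemform (k + 1) hk1lt
  rw [pvLcpA_eq]
  rw [PySem.List.pySetD_of_nonneg _ _ h01, PySem.List.pyGetD_of_nonneg _ _ h01,
    PySem.List.pySetD_of_nonneg _ _ h02, PySem.List.pyGetD_of_nonneg _ _ h02]

theorem foldA_inv (t : List (Nat × String)) (n : Nat) (hlen : t.length = n)
    (hfst : ∀ p ∈ t, p.1 < n) (hnd : (t.map Prod.fst).Nodup) (i : Nat) (hi : i ≤ n - 1) :
    ((List.range i).foldl (pvStepA t) (List.replicate n 0)).length = n ∧
    ∀ k, ((List.range i).foldl (pvStepA t) (List.replicate n 0)).getD k 0 = (pvAMax t k i : Int) := by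
  induction i with
  | zero =>
    refine ⟨by simp, fun k => ?_⟩
    rw [pvAMax]
    rcases Nat.lt_or_ge k n with hk | hk
    · rw [List.getD_eq_getElem _ _ (by simpa using hk)]
      simp
    · rw [List.getD_eq_default _ _ (by simpa using hk)]
      simp
  | succ i ih =>
    obtain ⟨hL, hV⟩ := ih (by omega)
    rw [List.range_succ, List.foldl_append, List.foldl_cons, List.foldl_nil]
    have hilt : i < t.length := by omega
    have hi1lt : i + 1 < t.length := by omega
    have hp1 : t.getD i (0, "") = t[i] := List.getD_eq_getElem _ _ hilt
    have hp2 : t.getD (i + 1) (0, "") = t[i + 1] := List.getD_eq_getElem _ _ hi1lt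
    have hfst1 : t[i].1 < n := hfst _ (List.getElem_mem hilt)
    have hfst2 : t[i + 1].1 < n := hfst _ (List.getElem_mem hi1lt)
    have hne : t[i].1 ≠ t[i + 1].1 := by
      have h2 := List.pairwise_iff_getElem.mp hnd i (i + 1)
        (by simpa using hilt) (by simpa using hi1lt) (by omega)
      simpa using h2
    rw [pvStepA, hp1, hp2]
    refine ⟨by simp [hL], fun k => ?_⟩
    rw [pvAMax, hp1, hp2]
    by_cases hk2 : k = t[i + 1].1
    · subst hk2
      rw [getD_set]
      rw [if_pos ⟨rfl, by rw [List.length_set, hL]; omega⟩]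
      rw [getD_set, if_neg (fun hc => hne hc.1.symm), hV]
      rw [if_pos (Or.inr rfl)]
      push_cast
      rfl
    · by_cases hk1 : k = t[i].1
      · subst hk1
        rw [getD_set, if_neg (fun hc => hk2 hc.1), getD_set,
          if_pos ⟨rfl, by rw [hL]; omega⟩, hV, if_pos (Or.inl rfl)]
        push_cast
        rfl
      · rw [getD_set, if_neg (fun hc => hk2 hc.1), getD_set,
          if_neg (fun hc => hk1 hc.1), hV,
          if_neg (by rintro (h | h) <;> [exact hk1 h.symm; exact hk2 h.symm])]

-- characterisations of the two maxima ----------------------------------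

theorem pvAMax_cases (t : List (Nat × String)) (k i : Nat) :
    pvAMax t k i = 0 ∨ ∃ p, p < i ∧
      ((t.getD p (0, "")).1 = k ∨ (t.getD (p + 1) (0, "")).1 = k) ∧
      pvAMax t k i = pvLcpB (t.getD p (0, "")).2.toList (t.getD (p + 1) (0, "")).2.toList := by
  induction i with
  | zero => exact Or.inl rfl
  | succ i ih =>
    rw [pvAMax]
    split_ifs with hc
    · rcases max_choice (pvAMax t k i) (pvLcpB (t.getD i (0, "")).2.toList (t.getD (i + 1) (0, "")).2.toList) with h | h
      · rw [h]
        rcases ih with h0 | ⟨p, hp, hcond, heq⟩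
        · exact Or.inl h0
        · exact Or.inr ⟨p, by omega, hcond, heq⟩
      · exact Or.inr ⟨i, by omega, hc, h⟩
    · rcases ih with h0 | ⟨p, hp, hcond, heq⟩
      · exact Or.inl h0
      · exact Or.inr ⟨p, by omega, hcond, heq⟩

theorem pvAMax_mono (t : List (Nat × String)) (k i : Nat) : pvAMax t k i ≤ pvAMax t k (i + 1) := by
  rw [pvAMax]
  split_ifs
  · exact Nat.le_max_left _ _
  · exact Nat.le_refl _

theorem pvAMax_ge (t : List (Nat × String)) (k : Nat) (i p : Nat) (hp : p < i)
    (hc : (t.getD p (0, "")).1 = k ∨ (t.getD (p + 1) (0, "")).1 = k) :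
    pvLcpB (t.getD p (0, "")).2.toList (t.getD (p + 1) (0, "")).2.toList ≤ pvAMax t k i := by
  induction i with
  | zero => omega
  | succ i ih =>
    by_cases h : p = i
    · subst h
      rw [pvAMax, if_pos hc]
      exact Nat.le_max_right _ _
    · exact le_trans (ih (by omega)) (pvAMax_mono t k i)

theorem pvBMax_cases (s : List String) (k i : Nat) :
    pvBMax s k i = 0 ∨ ∃ j, j < i ∧ j ≠ k ∧ pvBMax s k i = pvN s k j := by
  induction i with
  | zero => exact Or.inl rfl
  | succ i ih =>
    rw [pvBMax]
    split_ifs with hc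
    · rcases max_choice (pvBMax s k i) (pvN s k i) with h | h
      · rw [h]
        rcases ih with h0 | ⟨j, hj, hjk, heq⟩
        · exact Or.inl h0
        · exact Or.inr ⟨j, by omega, hjk, heq⟩
      · exact Or.inr ⟨i, by omega, hc, h⟩
    · rcases ih with h0 | ⟨j, hj, hjk, heq⟩
      · exact Or.inl h0
      · exact Or.inr ⟨j, by omega, hjk, heq⟩

theorem pvBMax_mono (s : List String) (k i : Nat) : pvBMax s k i ≤ pvBMax s k (i + 1) := by
  rw [pvBMax]
  split_ifs
  · exact Nat.le_max_left _ _
  · exact Nat.le_refl _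

theorem pvBMax_ge (s : List String) (k : Nat) (i j : Nat) (hj : j < i) (hjk : j ≠ k) :
    pvN s k j ≤ pvBMax s k i := by
  induction i with
  | zero => omega
  | succ i ih =>
    by_cases h : j = i
    · subst h
      rw [pvBMax, if_pos hjk]
      exact Nat.le_max_right _ _
    · exact le_trans (ih (by omega)) (pvBMax_mono s k i)

theorem foldB_eq (s : List String) (k : Nat) (i : Nat) :
    (List.range i).foldl (fun acc j => if j ≠ k then max acc (pvN s k j) else acc) 0
      = pvBMax s k i := by
  induction i with
  | zero => rfl
  | succ i ih =>
    rw [List.range_succ, List.foldl_append, List.foldl_cons, List.foldl_nil, ih, pvBMax]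

theorem foldB_eq' (s : List String) (k : Nat) :
    (PySem.List.enumerate s 0).foldl
      (fun acc jt => if jt.1 ≠ ((k : Nat) : Int) then
        max acc (pvLcpB (s.getD k "").toList jt.2.toList) else acc) 0
      = pvBMax s k s.length := by
  rw [PySem.List.enumerate_eq_map_pyRange s "", PySem.List.len_eq,
    PySem.List.pyRange_zero_natCast, List.foldl_map, List.foldl_map]
  rw [← foldB_eq s k s.length]
  apply PySem.List.foldl_congr_mem
  intro acc j hj
  rw [List.mem_range] at hj
  dsimp only
  by_cases hjk : j = k
  · subst hjk
    rw [if_neg (by simp), if_neg (by simp)]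
  · rw [if_pos (by exact_mod_cast hjk), if_pos hjk, PySem.List.pyGetD_natCast, pvN]

theorem max_lcp_alt_eq_model (s : List String) :
    max_lcp_alt s = (List.range s.length).map (fun k => (pvBMax s k s.length : Int)) := by
  unfold max_lcp_alt
  apply List.ext_getElem
  · simp [PySem.List.length_enumerate]
  intro k hk1 hk2
  have hk : k < s.length := by simpa [PySem.List.length_enumerate] using hk1
  rw [List.getElem_map, List.getElem_map, List.getElem_range,
    PySem.List.getElem_enumerate s 0 k (by simpa [PySem.List.length_enumerate] using hk)]
  have hsk : s[k] = s.getD k "" := (List.getD_eq_getElem _ _ hk).symm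
  dsimp only
  rw [hsk]
  simp only [zero_add]
  exact congrArg _ (foldB_eq' s k)

-- the central combinatorial fact ----------------------------------------

theorem pvT_snd_mono (s : List String) (p q : Nat) (hpq : p ≤ q) (hq : q < (pvT s).length) :
    ((pvT s)[p]'(Nat.lt_of_le_of_lt hpq hq)).2 ≤ ((pvT s)[q]'hq).2 := by
  rcases eq_or_lt_of_le hpq with h | h
  · subst h; exact le_refl _
  · exact List.pairwise_iff_getElem.mp (pvT_sorted s) p q (by omega) hq h

theorem pvT_fst_ne (s : List String) (p q : Nat) (hp : p < (pvT s).length)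
    (hq : q < (pvT s).length) (hne : p ≠ q) : (pvT s)[p].1 ≠ (pvT s)[q].1 := by
  intro h
  apply hne
  have h1 : ((pvT s).map Prod.fst)[p]'(by simpa using hp)
      = ((pvT s).map Prod.fst)[q]'(by simpa using hq) := by simpa using h
  exact (List.Nodup.getElem_inj_iff (pvT_nodup_fst s)).mp h1

theorem pvAMax_eq_pvBMax (s : List String) (k : Nat) (hk : k < s.length) :
    pvAMax (pvT s) k (s.length - 1) = pvBMax s k s.length := by
  have hT : (pvT s).length = s.length := pvT_length s
  apply le_antisymm
  · rcases pvAMax_cases (pvT s) k (s.length - 1) with h0 | ⟨p, hp, hcond, heq⟩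
    · rw [h0]; exact Nat.zero_le _
    · have hpl : p < (pvT s).length := by omega
      have hp1l : p + 1 < (pvT s).length := by omega
      rw [List.getD_eq_getElem _ _ hpl, List.getD_eq_getElem _ _ hp1l] at hcond heq
      obtain ⟨hA1, hA2⟩ := pvT_mem s _ (List.getElem_mem hpl)
      obtain ⟨hB1, hB2⟩ := pvT_mem s _ (List.getElem_mem hp1l)
      have hne := pvT_fst_ne s p (p + 1) hpl hp1l (by omega)
      rcases hcond with hcL | hcR
      · rw [heq, hA2, hB2, hcL]
        exact pvBMax_ge s k s.length ((pvT s)[p + 1].1) hB1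
          (fun hh => hne (by rw [hcL, hh]))
      · rw [heq, hA2, hB2, hcR, pvLcpB_comm]
        exact pvBMax_ge s k s.length ((pvT s)[p].1) hA1
          (fun hh => hne (by rw [hcR, hh]))
  · rcases pvBMax_cases s k s.length with h0 | ⟨j, hj, hjk, heq⟩
    · rw [h0]; exact Nat.zero_le _
    · rw [heq]
      obtain ⟨p, hp, hpe⟩ := List.mem_iff_getElem.mp (pvT_surj s k hk)
      obtain ⟨q, hq, hqe⟩ := List.mem_iff_getElem.mp (pvT_surj s j hj)
      have hpq : p ≠ q := by
        intro h
        subst h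
        rw [hpe] at hqe
        exact hjk (congrArg Prod.fst hqe).symm
      rcases Nat.lt_or_ge p q with hlt | hge
      · have hp1 : p + 1 < (pvT s).length := by omega
        have hc : ((pvT s)[p]'(by omega)).1 = k := by rw [hpe]
        have key : pvN s k j ≤
            pvLcpB ((pvT s)[p]'(by omega)).2.toList ((pvT s)[p + 1]'hp1).2.toList := by
          have e1 : ((pvT s)[p]'(by omega)).2 = s.getD k "" := by rw [hpe]
          have e2 : ((pvT s)[q]'hq).2 = s.getD j "" := by rw [hqe]
          rw [pvN, ← e1, ← e2]
          apply pvLcpB_le_left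
          · exact String.le_iff_toList_le.mp (pvT_snd_mono s p (p + 1) (by omega) hp1)
          · exact String.le_iff_toList_le.mp (pvT_snd_mono s (p + 1) q (by omega) hq)
        refine le_trans key ?_
        have hA := pvAMax_ge (pvT s) k (s.length - 1) p (by omega)
          (by rw [List.getD_eq_getElem _ _ (by omega : p < (pvT s).length)]; exact Or.inl hc)
        rwa [List.getD_eq_getElem _ _ (by omega : p < (pvT s).length),
          List.getD_eq_getElem _ _ hp1] at hA
      · obtain ⟨r, rfl⟩ : ∃ r, p = r + 1 := ⟨p - 1, by omega⟩
        have hrl : r < (pvT s).length := by omega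
        have hr1l : r + 1 < (pvT s).length := by omega
        have hc : ((pvT s)[r + 1]'hr1l).1 = k := by rw [hpe]
        have key : pvN s k j ≤
            pvLcpB ((pvT s)[r]'hrl).2.toList ((pvT s)[r + 1]'hr1l).2.toList := by
          have e1 : ((pvT s)[r + 1]'hr1l).2 = s.getD k "" := by rw [hpe]
          have e2 : ((pvT s)[q]'hq).2 = s.getD j "" := by rw [hqe]
          rw [pvN, pvLcpB_comm, ← e1, ← e2]
          apply pvLcpB_le_right
          · exact String.le_iff_toList_le.mp (pvT_snd_mono s q r (by omega) hrl)
          · exact String.le_iff_toList_le.mp (pvT_snd_mono s r (r + 1) (by omega) hr1l)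
        refine le_trans key ?_
        have hA := pvAMax_ge (pvT s) k (s.length - 1) r (by omega)
          (by rw [List.getD_eq_getElem _ _ hrl, List.getD_eq_getElem _ _ hr1l]
              exact Or.inr hc)
        rwa [List.getD_eq_getElem _ _ hrl, List.getD_eq_getElem _ _ hr1l] at hA

theorem max_lcp_eq_alt (s : List String) : max_lcp s = max_lcp_alt s := by
  rw [max_lcp_eq_model, max_lcp_alt_eq_model]
  obtain ⟨hL, hV⟩ := foldA_inv (pvT s) s.length (pvT_length s)
    (fun p hp => (pvT_mem s p hp).1) (pvT_nodup_fst s) (s.length - 1) (le_refl _)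
  apply List.ext_getElem
  · rw [hL]; simp
  intro k hk1 hk2
  have hk : k < s.length := by rwa [hL] at hk1
  have hgk := hV k
  rw [List.getD_eq_getElem _ _ hk1] at hgk
  rw [hgk, List.getElem_map, List.getElem_range]
  exact congrArg _ (pvAMax_eq_pvBMax s k hk)

-- ===== VERDICT (by name: the statement is the Claim_ definition above) =====
theorem max_lcp_spec : Claim_equal_max_lcp := by
  intro strings _
  unfold Spec_max_lcp
  exact max_lcp_eq_alt strings
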